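-- pv_equiv track=rewrite | github.com/GabePZ/TheRiddlerSolution-CircularTrain | Simulation.py | one_way_approach
-- ===== SOURCE A (Python) =====
-- from typing import List, Dict
--
-- def one_way_approach(train: List[bool]) -> int:
--     """
--     Find the number of cars in a circular train only by turning train car lights on or off.
--
--     Strategy: Walk through the train around the train, every time you find a light that matches the starting light,
--     change it and return to start while keeping track of the number of cars you went through to get there.
--         - If the starting car's light has changed when you get back then you know you were just in the starting car and
--           can return the number of cars in the train.
--         - If the starting car's light is unchanged then repeat the process.
--
--     Time Complexity:
--         Worst Case: All of the lights on the train are the same. For each new car you see you have to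
--                     backtrack all the way to the start.
--
--         Average Case: We already know lights which are different than the start can't be the start and so there is no
--                       reason to backtrack in this case. On average 1/2 of the new lights seen will require backtracking
--                       and the other half will not.
--
--         Best Case: First light different than every other light. In this case you can make one complete loop. Find the
--                    first light and immediately backtrack for a total of 2n moves
--     """
--     starting_car_state: int = train[0]
--     num_cars: int = 0  # Accumulate number of cars in the train
--
--     # Initialize at 1 since we're not counting the first move between the starting car and the second
--     num_moves: int = 1
--     num_cars_from_start: int = 1
--
--     while True:
--         actual_position_in_train = num_cars_from_start % len(train)
--
--         if num_cars_from_start == 0 and train[actual_position_in_train] != starting_car_state: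
--             # If we've backtracked to the starting car and the light has changed then
--             # the last light we changed must have been the starting car. We now know
--             # how many cars there are!
--
--             assert num_cars == len(train)  # Assert that we were correct
--
--             return num_moves
--
--         # If we run into a car with the same light as the starting car
--         elif num_cars_from_start != 0 and train[actual_position_in_train] == starting_car_state:
--             # Change the light to the reverse of what it was
--             # - i%len(train) so that we don't get index out of bounds
--             train[num_cars_from_start % len(train)] = not train[actual_position_in_train]
--
--             # Backtrack to the starting car
--             num_moves += num_cars_from_start
--             num_cars = num_cars_from_start
--             num_cars_from_start = 0
--
--         else:
--
--             # If on the way around we encounter a car with a different light than the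
--             # starting car we know it isn't the starting car and can keep moving.
--             num_cars_from_start += 1
--             num_moves += 1
-- ===== SOURCE B (Python) =====
-- from typing import List
--
-- def one_way_approach(train: List[bool]) -> int:
--     # Closed form: every light in 1..n-1 equal to the starting light costs a
--     # round trip of 2*i moves, plus the final 2*n round trip via position 0.
--     # (Does not mutate `train`, unlike the original; return value is identical.)
--     head = train[0]
--     total = 2 * len(train)
--     for i in range(1, len(train)):
--         if train[i] == head:
--             total += 2 * i
--     return total
-- ===== Notes on version B (the rewrite author's own statement) =====
-- stated objective: faster
-- what changed: Replaces the walk-toggle-backtrack simulation by the closed form 2*n plus 2*i for every index i in 1..n-1 whose light equals the starting light, computed in one pass; Pre_ excludes the empty list, on which both A and B raise IndexError (train[0]).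
import Mathlib
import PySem

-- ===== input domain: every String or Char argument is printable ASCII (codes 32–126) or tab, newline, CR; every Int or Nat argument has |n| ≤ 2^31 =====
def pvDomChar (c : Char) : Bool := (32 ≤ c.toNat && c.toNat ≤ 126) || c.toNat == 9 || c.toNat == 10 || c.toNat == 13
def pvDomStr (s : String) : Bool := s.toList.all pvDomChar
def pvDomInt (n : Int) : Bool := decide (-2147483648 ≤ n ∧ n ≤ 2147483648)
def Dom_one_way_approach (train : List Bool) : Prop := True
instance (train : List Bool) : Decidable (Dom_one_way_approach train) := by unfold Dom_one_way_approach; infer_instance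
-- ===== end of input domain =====

-- B replaces A's walk/toggle/backtrack simulation by the one-pass closed form
-- 2*n + Σ 2*i over indices i in 1..n-1 whose light equals the starting light.
-- A mutates `train` in place (toggles lights); the equivalence proved is about the RETURN value only.

-- ===== PORT A =====
-- The while-True loop, as structural recursion on a fuel counter (totality guard only:
-- the proofs below show the chosen fuel is never exhausted on nonempty trains).
def owaLoop (fuel : Nat) (train : List Bool) (s : Bool)
    (numCars numMoves j : Int) : Int :=
  match fuel with
  | 0 => 0
  | f + 1 =>
    if j = 0 ∧ ¬ (PySem.List.pyGetD train (PySem.Int.mod j (train.length : Int)) false = s) then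
      numMoves
    else if j ≠ 0 ∧ PySem.List.pyGetD train (PySem.Int.mod j (train.length : Int)) false = s then
      owaLoop f
        (PySem.List.pySetD train (PySem.Int.mod j (train.length : Int))
          (!(PySem.List.pyGetD train (PySem.Int.mod j (train.length : Int)) false)))
        s j (numMoves + j) 0
    else
      owaLoop f train s numCars (numMoves + 1) (j + 1)

def one_way_approach (train : List Bool) : Int :=
  match PySem.List.pyGet? train 0 with
  | none => 0   -- Python raises IndexError on train[0]; excluded by Pre_
  | some s => owaLoop ((train.length + 2) * (train.length + 2)) train s 0 1 1

-- ===== PORT B =====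
def one_way_approach_alt (train : List Bool) : Int :=
  match PySem.List.pyGet? train 0 with
  | none => 0   -- Python raises IndexError on train[0]; excluded by Pre_
  | some head =>
    (PySem.List.pyRange 1 (train.length : Int) 1).foldl
      (fun total i =>
        if PySem.List.pyGetD train i false = head then total + 2 * i else total)
      (2 * (train.length : Int))

-- ===== PRECONDITION & SPEC =====
-- Pre_ excludes exactly the empty list, on which both Pythons raise IndexError (train[0]).
def Pre_one_way_approach (train : List Bool) : Prop := train ≠ []
instance (train : List Bool) : Decidable (Pre_one_way_approach train) := by
  unfold Pre_one_way_approach; infer_instance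
def pvWitness_one_way_approach : List Bool := [true, false, true]

def Spec_one_way_approach (train : List Bool) (out : Int) : Prop := out = one_way_approach_alt train
instance (train : List Bool) (out : Int) : Decidable (Spec_one_way_approach train out) := by
  unfold Spec_one_way_approach; infer_instance

-- ===== CLAIM (what is proved, stated in full; the proofs are below) =====
def Claim_equal_one_way_approach : Prop := ∀ (train : List Bool), Dom_one_way_approach train → Pre_one_way_approach train → Spec_one_way_approach train (one_way_approach train)

-- ===== LEMMAS AND PROOFS =====

-- Position-weighted sum of lights equal to s, positions indexed from i.
def gsum : List Bool → Bool → Int → Int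
  | [], _, _ => 0
  | x :: xs, s, i => (if x = s then i else 0) + gsum xs s (i + 1)

-- B's fold over range(j, n) equals 2 * gsum of the dropped suffix.
lemma foldB_eq (t : List Bool) (s : Bool) :
    ∀ (k j : Nat) (acc : Int), j ≤ t.length → t.length - j ≤ k →
    (PySem.List.pyRange (j : Int) (t.length : Int) 1).foldl
      (fun total i => if PySem.List.pyGetD t i false = s then total + 2 * i else total) acc
    = acc + 2 * gsum (t.drop j) s (j : Int) := by
  intro k
  induction k with
  | zero =>
    intro j acc hj hk
    have hjn : j = t.length := by omega
    subst hjn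
    rw [PySem.List.pyRange_one_eq_nil (by omega)]
    simp [gsum]
  | succ k ih =>
    intro j acc hj hk
    by_cases hlt : j < t.length
    · rw [PySem.List.pyRange_one_cons (by exact_mod_cast hlt)]
      rw [List.foldl_cons]
      have hcast : ((j : Int) + 1) = ((j + 1 : Nat) : Int) := by push_cast; ring
      rw [hcast, ih (j + 1) _ (by omega) (by omega)]
      rw [List.drop_eq_getElem_cons hlt]
      simp only [gsum, PySem.List.pyGetD_natCast, List.getD_eq_getElem?_getD,
        List.getElem?_eq_getElem hlt, Option.getD_some]
      push_cast
      split_ifs <;> ring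
    · have hjn : j = t.length := by omega
      subst hjn
      rw [PySem.List.pyRange_one_eq_nil (by omega)]
      simp [gsum]

lemma pyGet?_zero_cons_bool (x : Bool) (xs : List Bool) :
    PySem.List.pyGet? (x :: xs) 0 = some x := by
  simp [PySem.List.pyGet?, PySem.List.pyIdx?]

-- Skipping a block of non-matching lights does not change gsum.
lemma gsum_skip (u : List Bool) (s : Bool) :
    ∀ (k a b : Nat), a + k = b → b ≤ u.length →
    (∀ p : Nat, a ≤ p → p < b → u.getD p false ≠ s) →
    gsum (u.drop a) s (a : Int) = gsum (u.drop b) s (b : Int) := by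
  intro k
  induction k with
  | zero =>
    intro a b hab _ _
    have hba : b = a := by omega
    subst hba
    rfl
  | succ k ih =>
    intro a b hab hb hne
    have ha : a < u.length := by omega
    rw [List.drop_eq_getElem_cons ha]
    have h0 : ¬ (u[a] = s) := by
      have := hne a (le_refl a) (by omega)
      rwa [List.getD_eq_getElem u false ha] at this
    have hcast : ((a : Int) + 1) = ((a + 1 : Nat) : Int) := by push_cast; ring
    simp only [gsum, if_neg h0, hcast]
    rw [ih (a + 1) b (by omega) hb (fun p hp1 hp2 => hne p (by omega) hp2)]
    ring

-- Toggling a light equal to s removes exactly one match from the count.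
lemma countP_toggle (t : List Bool) (j : Nat) (s : Bool) (hj : j < t.length)
    (h : t[j] = s) :
    (t.set j (!s)).countP (fun x => x == s) + 1 = t.countP (fun x => x == s) := by
  rw [List.set_eq_take_cons_drop _ hj]
  conv_rhs => rw [← List.take_append_drop j t, List.drop_eq_getElem_cons hj]
  simp [List.countP_append, h]
  omega

lemma getD_set_ne (t : List Bool) (j p : Nat) (v : Bool) (hpj : j ≠ p) :
    (t.set j v).getD p false = t.getD p false := by
  rw [List.getD_eq_getElem?_getD, List.getElem?_set_ne hpj, ← List.getD_eq_getElem?_getD]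

lemma getD_set_self (t : List Bool) (j : Nat) (v : Bool) (hj : j < t.length) :
    (t.set j v).getD j false = v := by
  rw [List.getD_eq_getElem (_) false (by simpa using hj)]
  simp

-- The loop invariant: one trip into the train at position j (1 ≤ j ≤ n), starting light
-- still s, every light strictly between start and j already differs from s; the final
-- answer is moves - j + 2 * (weighted matches from j on) + 2n.
lemma owaLoop_eq (s : Bool) :
    ∀ (fuel : Nat) (t : List Bool) (cars moves : Int) (j : Nat),
    1 ≤ j → j ≤ t.length → t.getD 0 false = s →
    (∀ p : Nat, 1 ≤ p → p < j → t.getD p false ≠ s) →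
    (t.length + 1) * (t.countP (fun x => x == s)) + (t.length - j) + 2 ≤ fuel →
    owaLoop fuel t s cars moves (j : Int)
      = moves - j + 2 * gsum (t.drop j) s (j : Int) + 2 * t.length := by
  intro fuel
  induction fuel using Nat.strong_induction_on with
  | _ fuel ih =>
  intro t cars moves j hj1 hjn h0 hinv hfuel
  obtain ⟨f, rfl⟩ : ∃ f, fuel = f + 1 := ⟨fuel - 1, by omega⟩
  have hjz0 : (j : Int) ≠ 0 := by omega
  simp only [owaLoop]
  by_cases hlt : j < t.length
  · have hpos : PySem.Int.mod (j : Int) (t.length : Int) = (j : Int) := by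
      rw [PySem.Int.mod_natCast, Nat.mod_eq_of_lt hlt]
    rw [hpos]
    simp only [PySem.List.pyGetD_natCast]
    rw [if_neg (fun h => hjz0 h.1)]
    by_cases hs : t.getD j false = s
    · -- toggle branch: backtrack to start, then walk out again to position 1
      rw [if_pos ⟨hjz0, hs⟩]
      simp only [PySem.List.pySetD_natCast, hs]
      have hgj : t[j] = s := by rwa [List.getD_eq_getElem t false hlt] at hs
      have hc := countP_toggle t j s hlt hgj
      obtain ⟨f2, rfl⟩ : ∃ f2, f = f2 + 1 := ⟨f - 1, by omega⟩
      simp only [owaLoop]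
      have hlen' : (t.set j (!s)).length = t.length := by simp
      have hmod0 : PySem.Int.mod (0 : Int) (((t.set j (!s)).length : Nat) : Int) = ((0 : Nat) : Int) := by
        rw [show ((0:Int)) = ((0:Nat):Int) by norm_num, PySem.Int.mod_natCast, Nat.zero_mod]
      rw [hmod0]
      simp only [PySem.List.pyGetD_natCast]
      have h0' : (t.set j (!s)).getD 0 false = s := by
        rw [getD_set_ne t j 0 (!s) (by omega)]; exact h0
      -- state after backtracking: position 0, light unchanged, walk forward again
      rw [if_neg (fun h => h.2 h0')]
      rw [if_neg (fun h => h.1 rfl)]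
      have hrec := ih f2 (by omega) (t.set j (!s)) (j : Int) (moves + j + 1) 1
        (le_refl 1) (by simp; omega) h0' (fun p hp1 hp2 => absurd hp2 (by omega)) ?fuel
      case fuel =>
        rw [hlen']
        have hx : (t.length + 1) * ((t.set j (!s)).countP (fun x => x == s) + 1)
            = (t.length + 1) * ((t.set j (!s)).countP (fun x => x == s)) + (t.length + 1) := by
          ring
        rw [← hc, hx] at hfuel
        omega
      rw [show ((0:Int) + 1) = ((1:Nat):Int) by norm_num, hrec]
      have hskip : gsum ((t.set j (!s)).drop 1) s ((1:Nat) : Int)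
          = gsum ((t.set j (!s)).drop (j+1)) s ((j+1 : Nat) : Int) := by
        refine gsum_skip (t.set j (!s)) s j 1 (j+1) (by omega) (by simp; omega) ?_
        intro p hp1 hp2
        by_cases hpj : p = j
        · subst hpj
          rw [getD_set_self t p (!s) hlt]
          simp
        · rw [getD_set_ne t j p (!s) (fun h => hpj h.symm)]
          exact hinv p hp1 (by omega)
      have hdropset : (t.set j (!s)).drop (j+1) = t.drop (j+1) :=
        List.drop_set_of_lt (by omega)
      rw [hskip, hdropset, hlen']
      conv_rhs => rw [List.drop_eq_getElem_cons hlt]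
      simp only [gsum, if_pos hgj]
      push_cast
      ring
    · -- forward branch: this light differs from the start, keep walking
      rw [if_neg (fun h => hs h.2)]
      have hrec := ih f (by omega) t cars (moves + 1) (j + 1) (by omega) (by omega) h0
        (by intro p hp1 hp2
            by_cases hpj : p = j
            · subst hpj; exact hs
            · exact hinv p hp1 (by omega))
        (by omega)
      rw [show ((j:Int) + 1) = ((j+1 : Nat):Int) by push_cast; ring, hrec]
      conv_rhs => rw [List.drop_eq_getElem_cons hlt]
      have hgj : ¬ (t[j] = s) := by rwa [List.getD_eq_getElem t false hlt] at hs
      simp only [gsum, if_neg hgj]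
      push_cast
      ring
  · -- j = length: the matching light is the starting car itself; toggle it and return
    have hjn' : j = t.length := by omega
    subst hjn'
    have hpos : PySem.Int.mod ((t.length : Nat) : Int) ((t.length : Nat) : Int) = ((0:Nat) : Int) := by
      rw [PySem.Int.mod_natCast, Nat.mod_self]
    rw [hpos]
    simp only [PySem.List.pyGetD_natCast, PySem.List.pySetD_natCast]
    rw [if_neg (fun h => h.2 h0)]
    rw [if_pos ⟨hjz0, h0⟩]
    obtain ⟨f2, rfl⟩ : ∃ f2, f = f2 + 1 := ⟨f - 1, by omega⟩
    simp only [owaLoop]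
    have hmod0 : PySem.Int.mod (0 : Int) (((t.set 0 (!t.getD 0 false)).length : Nat) : Int) = ((0 : Nat) : Int) := by
      rw [show ((0:Int)) = ((0:Nat):Int) by norm_num, PySem.Int.mod_natCast, Nat.zero_mod]
    rw [hmod0]
    simp only [PySem.List.pyGetD_natCast]
    have hset0 : (t.set 0 (!t.getD 0 false)).getD 0 false = !s := by
      rw [h0, getD_set_self t 0 (!s) (by omega)]
    rw [if_pos ⟨by trivial, by rw [hset0]; simp⟩]
    rw [List.drop_length]
    simp [gsum]
    ring

-- B's port in closed form over gsum.
lemma alt_closed (hd : Bool) (tl : List Bool) :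
    one_way_approach_alt (hd :: tl)
      = 2 * (((hd :: tl).length : Nat) : Int) + 2 * gsum ((hd :: tl).drop 1) hd ((1:Nat) : Int) := by
  unfold one_way_approach_alt
  rw [pyGet?_zero_cons_bool]
  rw [show ((1:Int)) = ((1:Nat):Int) by norm_num]
  exact foldB_eq (hd :: tl) hd (hd :: tl).length 1 _ (by simp) (by omega)

-- ===== VERDICT (by name: the statement is the Claim_ definition above) =====
theorem one_way_approach_spec : Claim_equal_one_way_approach := by
  intro train _ hpre
  unfold Spec_one_way_approach
  cases train with
  | nil => exact absurd rfl hpre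
  | cons hd tl =>
    unfold one_way_approach
    rw [pyGet?_zero_cons_bool]
    have h0 : (hd :: tl).getD 0 false = hd := rfl
    have hcl : (hd :: tl).countP (fun x => x == hd) ≤ (hd :: tl).length :=
      List.countP_le_length
    have hfb : ((hd :: tl).length + 1) * ((hd :: tl).countP (fun x => x == hd))
        + ((hd :: tl).length - 1) + 2 ≤ ((hd :: tl).length + 2) * ((hd :: tl).length + 2) := by
      have h1 : ((hd :: tl).length + 1) * ((hd :: tl).countP (fun x => x == hd))
          ≤ ((hd :: tl).length + 1) * (hd :: tl).length :=
        Nat.mul_le_mul_left _ hcl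
      have h2 : ((hd :: tl).length + 1) * (hd :: tl).length + ((hd :: tl).length - 1) + 2
          ≤ ((hd :: tl).length + 2) * ((hd :: tl).length + 2) := by
        simp only [List.length_cons, Nat.add_sub_cancel]
        nlinarith
      omega
    have hmain := owaLoop_eq hd (((hd :: tl).length + 2) * ((hd :: tl).length + 2))
      (hd :: tl) 0 1 1 (le_refl 1) (by simp) h0
      (fun p hp1 hp2 => absurd hp2 (by omega)) hfb
    rw [alt_closed]
    push_cast at hmain ⊢
    rw [hmain]
    ring
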